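-- pv_equiv track=rewrite | github.com/RomashkoG/2course_algorithms | 11_8_e7031.py | function
-- ===== SOURCE A (Python) =====
-- def function(arr, t):
--     def merge_sort(arr):
--         if len(arr) <= 1:
--             return arr, 0
--
--         mid = len(arr) // 2
--         left, inv_left = merge_sort(arr[:mid])
--         right, inv_right = merge_sort(arr[mid:])
--         merged, count_cross = merge_and_count(left, right)
--
--         return merged, inv_left + inv_right + count_cross
--
--     def merge_and_count(left, right):
--         count = 0
--         j = 0
--         for i in range(len(left)):
--             while j < len(right) and left[i] > right[j] + t:
--                 j += 1
--             count += j
--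
--         merged = []
--         i = j = 0
--         while i < len(left) and j < len(right):
--             if left[i] <= right[j]:
--                 merged.append(left[i])
--                 i += 1
--             else:
--                 merged.append(right[j])
--                 j += 1
--         merged += left[i:]
--         merged += right[j:]
--
--         return merged, count
--
--     _, total_count = merge_sort(arr)
--     return total_count
-- ===== SOURCE B (Python) =====
-- def function(arr, t):
--     count = 0
--     rest = arr
--     while rest:
--         x, rest = rest[0], rest[1:]
--         for y in rest:
--             if x > y + t:
--                 count += 1
--     return count
-- ===== Notes on version B (the rewrite author's own statement) =====
-- stated objective: simpler
-- what changed: Replaces the merge-sort / two-pointer cross-counting machinery with a direct one-accumulator scan that, for each element, counts the later elements it exceeds by more than t.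
import Mathlib
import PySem

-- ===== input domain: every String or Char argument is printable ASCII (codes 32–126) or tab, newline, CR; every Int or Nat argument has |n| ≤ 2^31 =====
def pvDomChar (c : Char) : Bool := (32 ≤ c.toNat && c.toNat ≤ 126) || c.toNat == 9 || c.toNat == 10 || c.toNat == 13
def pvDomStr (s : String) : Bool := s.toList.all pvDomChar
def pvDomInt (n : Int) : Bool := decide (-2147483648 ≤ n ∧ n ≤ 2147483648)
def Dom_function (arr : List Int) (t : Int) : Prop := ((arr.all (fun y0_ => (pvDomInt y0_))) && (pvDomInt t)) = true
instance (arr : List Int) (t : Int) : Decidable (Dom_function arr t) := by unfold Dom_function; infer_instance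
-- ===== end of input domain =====

-- B replaces A's merge-sort cross-counting with a plain quadratic scan; objective: simpler.

-- ===== PORT A =====
-- inner `while j < len(right) and left[i] > right[j] + t: j += 1`
-- (j is always in [0, right.length], so `right.getD j 0` is exactly Python's `right[j]` here)
def pvAdv (t x : Int) (right : List Int) (j : Nat) : Nat :=
  if j < right.length ∧ x > right.getD j 0 + t then pvAdv t x right (j + 1) else j
termination_by right.length - j
decreasing_by omega

-- the `for i in range(len(left))` counting loop of merge_and_count; state = (count, j)
def pvCountLoop (t : Int) (left right : List Int) : Int × Nat :=
  left.foldl (fun cj x =>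
    let j' := pvAdv t x right cj.2
    (cj.1 + (j' : Int), j')) (0, 0)

-- the merging while-loop of merge_and_count (indices i, j walking left/right)
def pvMerge : List Int → List Int → List Int
  | [], r => r
  | a :: l, [] => a :: l
  | a :: l, b :: r => if a ≤ b then a :: pvMerge l (b :: r) else b :: pvMerge (a :: l) r

-- merge_sort; `arr[:mid]` / `arr[mid:]` with 0 ≤ mid ≤ len are exactly take/drop
def pvMergeSort (t : Int) (arr : List Int) : List Int × Int :=
  if arr.length ≤ 1 then (arr, 0)
  else
    let mid := arr.length / 2
    let L := pvMergeSort t (arr.take mid)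
    let R := pvMergeSort t (arr.drop mid)
    let mc := (pvMerge L.1 R.1, (pvCountLoop t L.1 R.1).1)
    (mc.1, L.2 + R.2 + mc.2)
termination_by arr.length
decreasing_by
  · simp only [List.length_take]; omega
  · simp only [List.length_drop]; omega

def function (arr : List Int) (t : Int) : Int := (pvMergeSort t arr).2

-- ===== PORT B =====
-- the `for y in rest` inner loop
def pvInner (t x : Int) (rest : List Int) (count : Int) : Int :=
  rest.foldl (fun c y => if x > y + t then c + 1 else c) count

-- the `while rest:` loop, consuming rest head-first
def pvWhile (t : Int) : List Int → Int → Int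
  | [], count => count
  | x :: rest, count => pvWhile t rest (pvInner t x rest count)

def function_alt (arr : List Int) (t : Int) : Int := pvWhile t arr 0

-- ===== PRECONDITION & SPEC =====
def Spec_function (arr : List Int) (t : Int) (out : Int) : Prop := out = function_alt arr t
instance (arr : List Int) (t : Int) (out : Int) : Decidable (Spec_function arr t out) := by unfold Spec_function; infer_instance

-- ===== CLAIM (what is proved, stated in full; the proofs are below) =====
def Claim_equal_function : Prop := ∀ (arr : List Int) (t : Int), Dom_function arr t → Spec_function arr t (function arr t)

-- ===== LEMMAS AND PROOFS =====

-- number of y in r with x > y + t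
def pvCnt (t x : Int) (r : List Int) : Nat := r.countP (fun y => decide (x > y + t))

-- structural reference count of the pairs
def pvSpec (t : Int) : List Int → Int
  | [] => 0
  | x :: rest => (pvCnt t x rest : Int) + pvSpec t rest

def pvCross (t : Int) (l r : List Int) : Int := (l.map (fun x => (pvCnt t x r : Int))).sum

theorem pvInner_eq (t x : Int) (rest : List Int) : ∀ c, pvInner t x rest c = c + (pvCnt t x rest : Int) := by
  induction rest with
  | nil => intro c; simp [pvInner, pvCnt]
  | cons y ys ih =>
      intro c
      simp only [pvInner, List.foldl_cons] at *
      by_cases h : x > y + t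
      · rw [if_pos h]
        rw [ih]
        simp [pvCnt, List.countP_cons, h]
        ring
      · rw [if_neg h]
        rw [ih]
        simp [pvCnt, List.countP_cons, h]

theorem pvWhile_eq (t : Int) : ∀ l c, pvWhile t l c = c + pvSpec t l := by
  intro l
  induction l with
  | nil => intro c; simp [pvWhile, pvSpec]
  | cons x rest ih =>
      intro c
      simp only [pvWhile, pvSpec]
      rw [ih, pvInner_eq]
      ring

theorem alt_eq_spec (arr : List Int) (t : Int) : function_alt arr t = pvSpec t arr := by
  simp [function_alt, pvWhile_eq]

theorem pvCnt_append (t x : Int) (l r : List Int) : pvCnt t x (l ++ r) = pvCnt t x l + pvCnt t x r := by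
  simp [pvCnt, List.countP_append]

theorem pvSpec_append (t : Int) (l r : List Int) :
    pvSpec t (l ++ r) = pvSpec t l + pvSpec t r + pvCross t l r := by
  induction l with
  | nil => simp [pvSpec, pvCross]
  | cons x xs ih =>
      simp only [List.cons_append, pvSpec, pvCross, List.map_cons, List.sum_cons] at *
      rw [pvCnt_append, ih]
      push_cast
      ring

theorem pvCross_perm (t : Int) {l l' r r' : List Int} (hl : l.Perm l') (hr : r.Perm r') :
    pvCross t l r = pvCross t l' r' := by
  unfold pvCross
  have hcnt : ∀ x, pvCnt t x r = pvCnt t x r' := fun x => hr.countP_eq _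
  have : (l.map (fun x => (pvCnt t x r : Int))) = l.map (fun x => (pvCnt t x r' : Int)) := by
    simp [hcnt]
  rw [this]
  exact List.Perm.sum_eq (hl.map _)

theorem pvMerge_perm : ∀ l r : List Int, (pvMerge l r).Perm (l ++ r) := by
  intro l
  induction l with
  | nil => intro r; simp [pvMerge]
  | cons a l ihl =>
      intro r
      induction r with
      | nil => simp [pvMerge]
      | cons b r ihr =>
          simp only [pvMerge]
          by_cases h : a ≤ b
          · rw [if_pos h]
            exact List.Perm.cons a (ihl (b :: r))
          · rw [if_neg h]
            refine List.Perm.trans (List.Perm.cons b ihr) ?_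
            exact ((List.perm_middle).symm)

theorem pvMerge_sorted : ∀ l r : List Int, l.Sorted (· ≤ ·) → r.Sorted (· ≤ ·) →
    (pvMerge l r).Sorted (· ≤ ·) := by
  intro l
  induction l with
  | nil => intro r _ hr; simpa [pvMerge] using hr
  | cons a l ihl =>
      intro r hl hr
      induction r with
      | nil => simpa [pvMerge] using hl
      | cons b r ihr =>
          simp only [pvMerge]
          by_cases h : a ≤ b
          · rw [if_pos h]
            have hl' := (List.sorted_cons.mp hl)
            refine List.sorted_cons.mpr ⟨?_, ihl (b :: r) hl'.2 hr⟩
            intro z hz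
            have := (pvMerge_perm l (b :: r)).mem_iff.mp hz
            rcases List.mem_append.mp this with h1 | h2
            · exact hl'.1 z h1
            · rcases List.mem_cons.mp h2 with rfl | h3
              · exact h
              · exact le_trans h ((List.sorted_cons.mp hr).1 z h3)
          · rw [if_neg h]
            have hr' := (List.sorted_cons.mp hr)
            refine List.sorted_cons.mpr ⟨?_, ihr hr'.2⟩
            intro z hz
            have := (pvMerge_perm (a :: l) r).mem_iff.mp hz
            rcases List.mem_append.mp this with h1 | h2
            · rcases List.mem_cons.mp h1 with rfl | h3
              · omega
              · have := (List.sorted_cons.mp hl).1 z h3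
                omega
            · exact hr'.1 z h2

-- for sorted r: below pvCnt the condition holds
theorem pvCnt_getD (t x : Int) : ∀ (r : List Int), r.Sorted (· ≤ ·) → ∀ j, j < pvCnt t x r →
    j < r.length ∧ x > r.getD j 0 + t := by
  intro r
  induction r with
  | nil => intro _ j hj; simp [pvCnt] at hj
  | cons y ys ih =>
      intro hs j hj
      have hs' := List.sorted_cons.mp hs
      by_cases hy : x > y + t
      · cases j with
        | zero =>
            refine ⟨by simp, ?_⟩
            simpa using hy
        | succ j =>
            have hj' : j < pvCnt t x ys := by
              simp [pvCnt, List.countP_cons, hy] at hj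
              simpa [pvCnt] using hj
            have := ih hs'.2 j hj'
            exact ⟨by simpa using Nat.succ_lt_succ this.1, by simpa using this.2⟩
      · exfalso
        have h0 : pvCnt t x (y :: ys) = 0 := by
          simp only [pvCnt, List.countP_cons]
          have : ys.countP (fun y => decide (x > y + t)) = 0 := by
            rw [List.countP_eq_zero]
            intro z hz
            have := hs'.1 z hz
            simp only [decide_eq_true_eq]
            omega
          simp [this, hy]
        omega

-- for sorted r: at pvCnt the condition fails
theorem pvCnt_stop (t x : Int) : ∀ (r : List Int), r.Sorted (· ≤ ·) →
    ¬ (pvCnt t x r < r.length ∧ x > r.getD (pvCnt t x r) 0 + t) := by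
  intro r
  induction r with
  | nil => simp [pvCnt]
  | cons y ys ih =>
      intro hs
      have hs' := List.sorted_cons.mp hs
      by_cases hy : x > y + t
      · have hc : pvCnt t x (y :: ys) = pvCnt t x ys + 1 := by
          simp [pvCnt, List.countP_cons, hy]
        rw [hc]
        intro ⟨h1, h2⟩
        exact ih hs'.2 ⟨by simpa using h1, by simpa using h2⟩
      · have hc : pvCnt t x (y :: ys) = 0 := by
          simp only [pvCnt, List.countP_cons]
          have : ys.countP (fun y => decide (x > y + t)) = 0 := by
            rw [List.countP_eq_zero]
            intro z hz
            have := hs'.1 z hz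
            simp only [decide_eq_true_eq]
            omega
          simp [this, hy]
        rw [hc]
        intro ⟨_, h2⟩
        simp at h2
        omega

theorem pvAdv_eq (t x : Int) (r : List Int) (hs : r.Sorted (· ≤ ·)) :
    ∀ n j, pvCnt t x r - j = n → j ≤ pvCnt t x r → pvAdv t x r j = pvCnt t x r := by
  intro n
  induction n with
  | zero =>
      intro j hn hj
      have hj' : j = pvCnt t x r := by omega
      subst hj'
      rw [pvAdv]
      rw [if_neg (pvCnt_stop t x r hs)]
  | succ n ih =>
      intro j hn hj
      have hlt : j < pvCnt t x r := by omega
      have hc := pvCnt_getD t x r hs j hlt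
      rw [pvAdv, if_pos hc]
      exact ih (j + 1) (by omega) (by omega)

-- pvCnt is monotone in x
theorem pvCnt_mono (t : Int) {x x' : Int} (h : x ≤ x') (r : List Int) :
    pvCnt t x r ≤ pvCnt t x' r := by
  apply List.countP_mono_left
  intro a _
  simp only [decide_eq_true_eq]
  omega

theorem pvCountLoop_eq_aux (t : Int) (r : List Int) (hr : r.Sorted (· ≤ ·)) :
    ∀ (l : List Int), l.Sorted (· ≤ ·) → ∀ (c : Int) (j : Nat), (∀ x ∈ l, j ≤ pvCnt t x r) →
    (l.foldl (fun cj x =>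
      let j' := pvAdv t x r cj.2
      (cj.1 + (j' : Int), j')) (c, j)).1 = c + pvCross t l r := by
  intro l
  induction l with
  | nil => intro _ c j _; simp [pvCross]
  | cons x xs ih =>
      intro hl c j hj
      have hl' := List.sorted_cons.mp hl
      have hadv : pvAdv t x r j = pvCnt t x r :=
        pvAdv_eq t x r hr _ j rfl (hj x (by simp))
      simp only [List.foldl_cons, hadv]
      rw [ih hl'.2 (c + (pvCnt t x r : Int)) (pvCnt t x r)
        (fun x' hx' => pvCnt_mono t (hl'.1 x' hx') r)]
      simp [pvCross]
      ring

theorem pvCountLoop_eq (t : Int) (l r : List Int) (hl : l.Sorted (· ≤ ·)) (hr : r.Sorted (· ≤ ·)) :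
    (pvCountLoop t l r).1 = pvCross t l r := by
  have := pvCountLoop_eq_aux t r hr l hl 0 0 (fun x _ => Nat.zero_le _)
  simpa [pvCountLoop] using this

theorem pvMergeSort_main (t : Int) : ∀ (n : Nat) (arr : List Int), arr.length ≤ n →
    (pvMergeSort t arr).1.Sorted (· ≤ ·) ∧ (pvMergeSort t arr).1.Perm arr ∧
      (pvMergeSort t arr).2 = pvSpec t arr := by
  intro n
  induction n with
  | zero =>
      intro arr h
      have : arr = [] := List.length_eq_zero_iff.mp (by omega)
      subst this
      simp [pvMergeSort, pvSpec, List.sorted_nil]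
  | succ n ih =>
      intro arr hlen
      by_cases hsmall : arr.length ≤ 1
      · rw [pvMergeSort, if_pos hsmall]
        match arr, hsmall with
        | [], _ => simp [pvSpec, List.sorted_nil]
        | [x], _ => simp [pvSpec, pvCnt, List.sorted_singleton]
      · rw [pvMergeSort, if_neg hsmall]
        simp only []
        set mid := arr.length / 2 with hmid
        have h1 : (arr.take mid).length ≤ n := by
          simp only [List.length_take]; omega
        have h2 : (arr.drop mid).length ≤ n := by
          simp only [List.length_drop]; omega
        obtain ⟨sL, pL, cL⟩ := ih (arr.take mid) h1
        obtain ⟨sR, pR, cR⟩ := ih (arr.drop mid) h2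
        refine ⟨pvMerge_sorted _ _ sL sR, ?_, ?_⟩
        · refine (pvMerge_perm _ _).trans ?_
          refine ((pL.append pR).trans ?_)
          rw [List.take_append_drop]
        · rw [cL, cR, pvCountLoop_eq t _ _ sL sR]
          rw [pvCross_perm t pL pR]
          have := pvSpec_append t (arr.take mid) (arr.drop mid)
          rw [List.take_append_drop] at this
          omega

-- ===== VERDICT (by name: the statement is the Claim_ definition above) =====
theorem function_spec : Claim_equal_function := by
  intro arr t _
  unfold Spec_function function
  rw [alt_eq_spec]
  exact (pvMergeSort_main t arr.length arr le_rfl).2.2
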